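-- pv_equiv track=rewrite | github.com/somshekargr/nlp2.0 | nlp-search/utils/intent_search.py | search_dictionary
-- ===== SOURCE A (Python) =====
-- from collections import Counter
--
-- def search_dictionary(dictionary, search_string):
--     max_match_key = None
--     max_match_count = 0
--
--     for key, values in dictionary.items():
--         #combined_values = ' '.join(values)
--         word_counts = Counter(values)
--         search_counts = Counter(search_string.split())
--         match_count = sum((word_counts & search_counts).values())
--
--         if match_count > max_match_count:
--             max_match_count = match_count
--             max_match_key = key
--
--     return max_match_key
-- ===== SOURCE B (Python) =====
-- def search_dictionary(dictionary, search_string):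
--     search_words = sorted(search_string.split())
--     best_key = None
--     best = 0
--     for key, values in dictionary.items():
--         vs = sorted(values)
--         i = j = 0
--         score = 0
--         while i < len(vs) and j < len(search_words):
--             if vs[i] < search_words[j]:
--                 i += 1
--             elif search_words[j] < vs[i]:
--                 j += 1
--             else:
--                 score += 1
--                 i += 1
--                 j += 1
--         if score > best:
--             best = score
--             best_key = key
--     return best_key
-- ===== Notes on version B (the rewrite author's own statement) =====
-- stated objective: alternative
-- what changed: B computes each key's multiset word overlap by sorting the search words once and each key's value list, then counting common elements with a two-pointer merge of the two sorted lists, instead of A's per-key hash Counters and Counter intersection.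
import Mathlib
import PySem

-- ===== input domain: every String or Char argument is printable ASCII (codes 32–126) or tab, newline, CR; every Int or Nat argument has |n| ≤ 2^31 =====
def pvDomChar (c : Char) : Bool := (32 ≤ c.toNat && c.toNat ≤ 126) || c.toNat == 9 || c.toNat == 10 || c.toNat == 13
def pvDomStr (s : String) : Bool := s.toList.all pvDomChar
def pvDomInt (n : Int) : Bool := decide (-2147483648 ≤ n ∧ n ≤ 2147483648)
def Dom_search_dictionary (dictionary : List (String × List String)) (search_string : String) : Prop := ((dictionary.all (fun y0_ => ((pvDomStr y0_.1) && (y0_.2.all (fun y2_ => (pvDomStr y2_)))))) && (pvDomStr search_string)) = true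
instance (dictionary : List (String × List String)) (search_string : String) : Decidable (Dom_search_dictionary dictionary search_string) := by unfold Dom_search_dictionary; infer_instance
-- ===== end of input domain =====

-- B replaces A's per-key hash Counters and Counter-intersection by sorting the word lists and
-- counting the common elements with a two-pointer merge (objective: alternative, comparison-based).


-- ===== PORT A =====
-- Python Counter '&': min of the two counts over the first counter's keys, keeping positive entries.
def counterAnd (a b : PySem.Dict String Int) : PySem.Dict String Int :=
  PySem.Dict.mk (a.items.filterMap (fun kv =>
    let m := min kv.2 (b.getD kv.1 0)
    if 0 < m then some (kv.1, m) else none))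

def search_dictionary (dictionary : List (String × List String)) (search_string : String) : Option String :=
  (dictionary.foldl (fun st kv =>
      let word_counts := PySem.Dict.counter kv.2
      let search_counts := PySem.Dict.counter (PySem.Str.split₀ search_string)
      let match_count := (counterAnd word_counts search_counts).values.sum
      if st.2 < match_count then (some kv.1, match_count) else st)
    ((none : Option String), (0 : Int))).1

-- ===== PORT B =====
-- the while loop over indices i, j, ported as recursion on the two remaining suffixes
def mergeCount : List String → List String → Int
  | x :: xs, y :: ys =>
    if x < y then mergeCount xs (y :: ys)
    else if y < x then mergeCount (x :: xs) ys
    else 1 + mergeCount xs ys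
  | _, _ => 0
termination_by xs ys => xs.length + ys.length

def search_dictionary_alt (dictionary : List (String × List String)) (search_string : String) : Option String :=
  let search_words := PySem.List.sorted (PySem.Str.split₀ search_string) (fun y => y) false
  (dictionary.foldl (fun st kv =>
      let vs := PySem.List.sorted kv.2 (fun y => y) false
      let score := mergeCount vs search_words
      if st.2 < score then (some kv.1, score) else st)
    ((none : Option String), (0 : Int))).1

-- ===== PRECONDITION & SPEC =====
def Spec_search_dictionary (dictionary : List (String × List String)) (search_string : String) (out : Option String) : Prop := out = search_dictionary_alt dictionary search_string
instance (dictionary : List (String × List String)) (search_string : String) (out : Option String) : Decidable (Spec_search_dictionary dictionary search_string out) := by unfold Spec_search_dictionary; infer_instance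

-- ===== CLAIM (what is proved, stated in full; the proofs are below) =====
def Claim_equal_search_dictionary : Prop := ∀ (dictionary : List (String × List String)) (search_string : String), Dom_search_dictionary dictionary search_string → Spec_search_dictionary dictionary search_string (search_dictionary dictionary search_string)

-- ===== LEMMAS AND PROOFS =====

-- the common per-key score: over each distinct search word, min of the two occurrence counts
def pvScore (words vs : List String) : Int :=
  ((PySem.List.dedup words).map (fun w => min ((PySem.List.count vs w : Int)) ((PySem.List.count words w : Int)))).sum

theorem sum_filterMap_pos (l : List String) (f : String → Int) :
    ((l.filterMap (fun k => if 0 < f k then some (k, f k) else none)).map (·.2)).sum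
      = ((l.filter (fun k => decide (0 < f k))).map f).sum := by
  induction l with
  | nil => rfl
  | cons a t ih =>
    by_cases h : 0 < f a
    · simp [h, ih]
    · simp [h, ih]

theorem sum_drop_zero (l : List String) (f : String → Int) (h : ∀ w ∈ l, 0 ≤ f w) :
    ((l.filter (fun k => decide (0 < f k))).map f).sum = (l.map f).sum := by
  induction l with
  | nil => rfl
  | cons a t ih =>
    have ha := h a (List.mem_cons_self ..)
    by_cases hp : 0 < f a
    · simp [hp, ih (fun w hw => h w (List.mem_cons_of_mem _ hw))]
    · have h0 : f a = 0 := by omega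
      simp [ih (fun w hw => h w (List.mem_cons_of_mem _ hw)), h0]

-- A's per-key match_count equals the common score
theorem match_count_eq (words vs : List String) :
    (counterAnd (PySem.Dict.counter vs) (PySem.Dict.counter words)).values.sum = pvScore words vs := by
  have hval : ∀ (l : List (String × Int)), (PySem.Dict.mk l).values = l.map (·.2) := by
    intro l; rfl
  set f : String → Int := fun w => min ((List.count w vs : Int)) ((List.count w words : Int)) with hf
  have hL : (counterAnd (PySem.Dict.counter vs) (PySem.Dict.counter words)).values.sum
      = (((PySem.Set.ofList vs).filterMap (fun k => if 0 < f k then some (k, f k) else none)).map (·.2)).sum := by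
    simp only [counterAnd, hval, PySem.Dict.items_counter, List.filterMap_map]
    refine congrArg List.sum (congrArg (List.map (fun p : String × Int => p.2)) ?_)
    apply List.filterMap_congr
    intro k _
    simp [PySem.Dict.getD_counter, hf]
  rw [hL, sum_filterMap_pos]
  have hperm : ((PySem.Set.ofList vs).filter (fun k => decide (0 < f k))).Perm
      ((PySem.Set.ofList words).filter (fun k => decide (0 < f k))) := by
    rw [List.perm_ext_iff_of_nodup (PySem.Set.nodup_ofList vs |>.filter _) (PySem.Set.nodup_ofList words |>.filter _)]
    intro a
    simp only [List.mem_filter, PySem.Set.mem_ofList, decide_eq_true_eq]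
    constructor
    · rintro ⟨_, hpos⟩
      refine ⟨?_, hpos⟩
      have : 0 < (List.count a words : Int) := lt_of_lt_of_le hpos (min_le_right _ _)
      exact List.count_pos_iff.mp (by exact_mod_cast this)
    · rintro ⟨_, hpos⟩
      refine ⟨?_, hpos⟩
      have : 0 < (List.count a vs : Int) := lt_of_lt_of_le hpos (min_le_left _ _)
      exact List.count_pos_iff.mp (by exact_mod_cast this)
  rw [List.Perm.sum_eq (hperm.map f)]
  rw [sum_drop_zero _ _ (fun w _ => le_min (Int.natCast_nonneg _) (Int.natCast_nonneg _))]
  simp [pvScore, PySem.List.count_eq]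

-- the two-pointer merge on SORTED lists computes the multiset-intersection cardinality
theorem mergeCount_eq_inter_card (xs ys : List String)
    (hx : xs.Pairwise (· ≤ ·)) (hy : ys.Pairwise (· ≤ ·)) :
    mergeCount xs ys = (((xs : Multiset String) ∩ (ys : Multiset String)).card : Int) := by
  induction xs, ys using mergeCount.induct with
  | case1 x xs y ys h ih =>
    rw [mergeCount, if_pos h]
    have hnot : x ∉ (y :: ys) := by
      intro hm
      rcases List.mem_cons.mp hm with rfl | hm'
      · exact lt_irrefl x h
      · exact absurd (List.rel_of_pairwise_cons hy hm') (not_le.mpr h)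
    have hm : ((x :: xs : List String) : Multiset String) ∩ ((y :: ys : List String) : Multiset String)
        = ((xs : List String) : Multiset String) ∩ ((y :: ys : List String) : Multiset String) := by
      rw [← Multiset.cons_coe x xs, Multiset.cons_inter_of_neg _ (by simpa using hnot)]
    rw [ih (List.Pairwise.of_cons hx) hy, hm]
  | case2 x xs y ys h1 h2 ih =>
    rw [mergeCount, if_neg h1, if_pos h2]
    have hnot : y ∉ (x :: xs) := by
      intro hm
      rcases List.mem_cons.mp hm with rfl | hm'
      · exact lt_irrefl y h2
      · exact absurd (List.rel_of_pairwise_cons hx hm') (not_le.mpr h2)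
    have hm : ((x :: xs : List String) : Multiset String) ∩ ((y :: ys : List String) : Multiset String)
        = ((x :: xs : List String) : Multiset String) ∩ ((ys : List String) : Multiset String) := by
      rw [Multiset.inter_comm, ← Multiset.cons_coe y ys,
          Multiset.cons_inter_of_neg _ (by simpa using hnot), Multiset.inter_comm]
    rw [ih hx (List.Pairwise.of_cons hy), hm]
  | case3 x xs y ys h1 h2 ih =>
    have hxy : x = y := le_antisymm (not_lt.mp h2) (not_lt.mp h1)
    subst hxy
    rw [mergeCount, if_neg h1, if_neg h2]
    rw [ih (List.Pairwise.of_cons hx) (List.Pairwise.of_cons hy)]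
    have : ((x :: xs : List String) : Multiset String) ∩ ((x :: ys : List String) : Multiset String)
        = x ::ₘ (((xs : List String) : Multiset String) ∩ (ys : Multiset String)) := by
      rw [← Multiset.cons_coe, ← Multiset.cons_coe,
          Multiset.cons_inter_of_pos _ (Multiset.mem_cons_self x _)]
      congr 1
      rw [Multiset.erase_cons_head]
    rw [this, Multiset.card_cons]
    push_cast
    ring
  | case4 xs ys h =>
    match xs, ys, h with
    | [], ys, _ => simp [mergeCount]
    | x :: xs, [], _ => simp [mergeCount]
    | x :: xs, y :: ys, h => exact absurd rfl (fun hc => h x xs y ys hc rfl)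

-- the multiset-intersection cardinality equals the common score
theorem inter_card_eq_pvScore (words vs : List String) :
    ((((vs : List String) : Multiset String) ∩ ((words : List String) : Multiset String)).card : Int)
      = pvScore words vs := by
  have hcard : (((vs : Multiset String)) ∩ (words : Multiset String)).card
      = ((PySem.List.dedup words).map (fun w => min (List.count w vs) (List.count w words))).sum := by
    rw [← Multiset.toFinset_sum_count_eq]
    have hsub : ((vs : Multiset String) ∩ (words : Multiset String)).toFinset ⊆ (words : Multiset String).toFinset := by
      intro a ha
      rw [Multiset.mem_toFinset] at ha ⊢
      exact Multiset.mem_of_le (Multiset.inter_le_right ..) ha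
    rw [Finset.sum_subset hsub ?hzero]
    case hzero =>
      intro a _ ha
      rw [Multiset.mem_toFinset, ← Multiset.count_pos, Nat.pos_iff_ne_zero, not_not] at ha
      exact ha
    have hset : (words : Multiset String).toFinset = (PySem.List.dedup words).toFinset := by
      apply Finset.ext
      intro a
      simp
    rw [hset, List.sum_toFinset _ (PySem.List.nodup_dedup words)]
    apply congrArg List.sum
    apply List.map_congr_left
    intro w _
    rw [Multiset.count_inter]
    simp [Multiset.coe_count]
  rw [hcard, Nat.cast_list_sum, List.map_map]
  simp only [pvScore, PySem.List.count_eq]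
  apply congrArg List.sum
  apply List.map_congr_left
  intro w _
  simp [Nat.cast_min]

-- B's per-key score equals the common score
theorem merge_score_eq (words vs : List String) :
    mergeCount (PySem.List.sorted vs (fun y => y) false) (PySem.List.sorted words (fun y => y) false)
      = pvScore words vs := by
  rw [mergeCount_eq_inter_card _ _
        (by simpa using PySem.List.sorted_pairwise vs (fun y => y))
        (by simpa using PySem.List.sorted_pairwise words (fun y => y))]
  have h1 : ((PySem.List.sorted vs (fun y => y) false : List String) : Multiset String) = (vs : Multiset String) :=
    Quot.sound (PySem.List.sorted_perm ..)
  have h2 : ((PySem.List.sorted words (fun y => y) false : List String) : Multiset String) = (words : Multiset String) :=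
    Quot.sound (PySem.List.sorted_perm ..)
  rw [h1, h2, inter_card_eq_pvScore]

theorem main_eq (dictionary : List (String × List String)) (search_string : String) :
    search_dictionary dictionary search_string = search_dictionary_alt dictionary search_string := by
  unfold search_dictionary search_dictionary_alt
  congr 2
  funext st kv
  simp only [match_count_eq, merge_score_eq]

-- ===== VERDICT (by name: the statement is the Claim_ definition above) =====
theorem search_dictionary_spec : Claim_equal_search_dictionary := by
  intro dictionary search_string _
  unfold Spec_search_dictionary
  exact main_eq dictionary search_string
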